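-- pv_equiv track=rewrite | github.com/lorenzowind/python-programming | Data Structures & Algorithms/Project Problems vs Algorithms/Problems/problem_3.py | get_highest_sum
-- ===== SOURCE A (Python) =====
-- def get_highest_sum(input_list):
--     digits_first, digits_second = get_digits(len(input_list))
--
--     first_number, second_number = "", ""
--
--     for i in range(digits_first):
--         first_number += str(input_list[(len(input_list) - 1) - i * 2])
--         if digits_first != digits_second:
--             if i != digits_first - 1:
--                 second_number += str(input_list[(len(input_list) - 2) - i * 2])
--         else:
--             second_number += str(input_list[(len(input_list) - 2) - i * 2])
--
--     return int(first_number), int(second_number)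
--
-- def get_digits(list_size):
--     if list_size % 2 != 0:
--         return list_size // 2 + 1, list_size // 2
--
--     return list_size // 2, list_size // 2
-- ===== SOURCE B (Python) =====
-- def get_highest_sum(input_list):
--     rev = input_list[::-1]
--     first_number = "".join(str(x) for x in rev[0::2])
--     second_number = "".join(str(x) for x in rev[1::2])
--     return int(first_number), int(second_number)
-- ===== Notes on version B (the rewrite author's own statement) =====
-- stated objective: simpler
-- what changed: Replaces the single index-arithmetic loop with its digits_first!=digits_second branch and skip-last-iteration special case by one list reversal plus two parity slices rev[0::2]/rev[1::2] joined and converted directly.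
import Mathlib
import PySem

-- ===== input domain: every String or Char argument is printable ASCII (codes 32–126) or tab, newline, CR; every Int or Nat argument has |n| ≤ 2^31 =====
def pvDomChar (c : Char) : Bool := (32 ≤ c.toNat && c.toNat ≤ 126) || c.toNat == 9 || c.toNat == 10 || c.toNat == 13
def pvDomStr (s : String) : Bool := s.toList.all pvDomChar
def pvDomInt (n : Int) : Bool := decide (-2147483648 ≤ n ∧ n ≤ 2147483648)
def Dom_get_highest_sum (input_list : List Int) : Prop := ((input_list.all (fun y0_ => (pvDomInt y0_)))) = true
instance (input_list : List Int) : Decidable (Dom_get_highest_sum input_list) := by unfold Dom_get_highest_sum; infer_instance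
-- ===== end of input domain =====

-- B replaces A's index-arithmetic loop (with its digits_first ≠ digits_second branch and
-- skip-last-iteration special case) by one reversal plus two parity slices; objective: simpler.

-- ===== PORT A =====
-- helper get_digits, literal
def get_digits (list_size : Int) : Int × Int :=
  if PySem.Int.mod list_size 2 ≠ 0 then
    (PySem.Int.floordiv list_size 2 + 1, PySem.Int.floordiv list_size 2)
  else
    (PySem.Int.floordiv list_size 2, PySem.Int.floordiv list_size 2)

-- strings are carried as List Char; indexing uses pyGetD 0 (in range on every iteration A runs),
-- and the final int(...) is ofChars? — 'none' (Python's ValueError) is excluded by Pre_ and defaulted to 0.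
def get_highest_sum (input_list : List Int) : Int × Int :=
  let n : Int := (input_list.length : Int)
  let dfs := get_digits n
  let digits_first := dfs.1
  let digits_second := dfs.2
  let fs := (PySem.List.pyRange 0 digits_first 1).foldl
    (fun (acc : List Char × List Char) i =>
      (acc.1 ++ PySem.Int.toChars (PySem.List.pyGetD input_list ((n - 1) - i * 2) 0),
       if digits_first ≠ digits_second then
         if i ≠ digits_first - 1 then
           acc.2 ++ PySem.Int.toChars (PySem.List.pyGetD input_list ((n - 2) - i * 2) 0)
         else acc.2
       else
         acc.2 ++ PySem.Int.toChars (PySem.List.pyGetD input_list ((n - 2) - i * 2) 0)))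
    ([], [])
  ((PySem.Int.ofChars? fs.1).getD 0, (PySem.Int.ofChars? fs.2).getD 0)

-- ===== PORT B =====
-- rev = input_list[::-1]; first from rev[0::2], second from rev[1::2]; int('') defaulted to 0 (excluded by Pre_)
def get_highest_sum_alt (input_list : List Int) : Int × Int :=
  let rev := (PySem.List.slice? input_list none none (-1)).getD []
  let first_number := PySem.Chars.join []
    (((PySem.List.slice? rev (some 0) none 2).getD []).map PySem.Int.toChars)
  let second_number := PySem.Chars.join []
    (((PySem.List.slice? rev (some 1) none 2).getD []).map PySem.Int.toChars)
  ((PySem.Int.ofChars? first_number).getD 0, (PySem.Int.ofChars? second_number).getD 0)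

-- ===== PRECONDITION & SPEC =====
-- Python A raises ValueError exactly when int() gets a non-numeral: n ≤ 1 gives int('') and a
-- negative element anywhere but the last two positions puts a '-' mid-string; B raises there too.
def Pre_get_highest_sum (input_list : List Int) : Prop :=
  2 ≤ input_list.length ∧ ∀ x ∈ input_list.take (input_list.length - 2), 0 ≤ x
instance (input_list : List Int) : Decidable (Pre_get_highest_sum input_list) := by
  unfold Pre_get_highest_sum; infer_instance
def pvWitness_get_highest_sum : List Int := [1, 2, 3, 4, 5]

def Spec_get_highest_sum (input_list : List Int) (out : Int × Int) : Prop := out = get_highest_sum_alt input_list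
instance (input_list : List Int) (out : Int × Int) : Decidable (Spec_get_highest_sum input_list out) := by unfold Spec_get_highest_sum; infer_instance

-- ===== CLAIM (what is proved, stated in full; the proofs are below) =====
def Claim_equal_get_highest_sum : Prop := ∀ (input_list : List Int), Dom_get_highest_sum input_list → Pre_get_highest_sum input_list → Spec_get_highest_sum input_list (get_highest_sum input_list)

-- ===== LEMMAS AND PROOFS =====

theorem join_nil_flatten (parts : List (List Char)) : PySem.Chars.join [] parts = parts.flatten := by
  unfold PySem.Chars.join
  induction parts with
  | nil => rfl
  | cons p ps ih =>
    cases ps with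
    | nil => simp [List.intercalate]
    | cons q qs =>
      simp only [List.intercalate, List.intersperse] at *
      simp_all [List.flatten]


theorem slice2_getD (xs : List Int) (a : Nat) (ha : a ≤ 1) :
  (PySem.List.slice? xs (some (a:Int)) none 2).getD [] =
    (List.range ((xs.length - a + 1)/2)).map (fun k => xs.getD (a + 2*k) 0) := by
  unfold PySem.List.slice? PySem.List.sliceIndices
  simp only [if_neg (by norm_num : ¬ ((2:Int) = 0)), if_neg (by norm_num : ¬ ((2:Int) < 0)),
    if_pos (by norm_num : (0:Int) < 2)]
  have hcast : ¬ ((a:Int) < 0) := by omega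
  simp only [hcast, if_false, Option.getD_some]
  by_cases hn : a < xs.length
  · have hmin : min (a:Int) (xs.length:Int) = (a:Int) := by omega
    rw [hmin, if_pos (by exact_mod_cast hn)]
    have hcount : (((xs.length:Int) - a + 2 - 1)/2).toNat = (xs.length - a + 1)/2 := by omega
    rw [hcount]
    rw [show List.map (fun k => xs.getD (a + 2*k) 0) (List.range ((xs.length - a + 1)/2))
        = List.filterMap (some ∘ fun k => xs.getD (a + 2*k) 0) (List.range ((xs.length - a + 1)/2)) by
      rw [List.filterMap_eq_map]]
    apply List.filterMap_congr
    intro k hk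
    simp only [List.mem_range] at hk
    have hidx : ((a:Int) + 2 * (k:Int)).toNat = a + 2*k := by omega
    have hlt : a + 2*k < xs.length := by omega
    rw [hidx]
    simp [List.getElem?_eq_getElem hlt]
  · have h2 : min (a:Int) (xs.length:Int) = (xs.length:Int) := by omega
    rw [h2, if_neg (by omega)]
    have : (xs.length - a + 1)/2 = 0 := by omega
    simp [this]


def cf (l : List Int) : List Char :=
  ((List.range ((l.length + 1)/2)).map (fun k => PySem.Int.toChars (l.getD (l.length - 1 - 2*k) 0))).flatten
def cs (l : List Int) : List Char :=
  ((List.range (l.length/2)).map (fun k => PySem.Int.toChars (l.getD (l.length - 2 - 2*k) 0))).flatten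


theorem rev_getD (l : List Int) (i : Nat) (h : i < l.length) :
    l.reverse.getD i 0 = l.getD (l.length - 1 - i) 0 := by
  rw [List.getD_eq_getElem?_getD, List.getD_eq_getElem?_getD,
    List.getElem?_reverse (by simpa using h)]


theorem pyGetD_toGetD (xs : List Int) (i : Int) (h0 : 0 ≤ i) (h1 : i < (xs.length : Int)) :
    PySem.List.pyGetD xs i 0 = xs.getD i.toNat 0 := by
  rw [PySem.List.pyGetD_eq_getElem xs 0 h0 h1, List.getD_eq_getElem xs 0 (by omega)]


theorem alt_eq (l : List Int) :
    get_highest_sum_alt l = ((PySem.Int.ofChars? (cf l)).getD 0, (PySem.Int.ofChars? (cs l)).getD 0) := by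
  unfold get_highest_sum_alt
  rw [PySem.List.slice?_none_none_neg_one]
  simp only [Option.getD_some]
  rw [show ((0:Int) = ((0:Nat):Int)) by norm_cast, show ((1:Int) = ((1:Nat):Int)) by norm_cast,
    slice2_getD l.reverse 0 (by norm_num), slice2_getD l.reverse 1 (by norm_num)]
  rw [join_nil_flatten, join_nil_flatten]
  have hc1 : (l.reverse.length - 0 + 1)/2 = (l.length + 1)/2 := by simp
  have hc2 : (l.reverse.length - 1 + 1)/2 = l.length/2 := by
    simp only [List.length_reverse]; omega
  rw [hc1, hc2]
  unfold cf cs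
  have h1 : (List.map PySem.Int.toChars
      (List.map (fun k => l.reverse.getD (0 + 2 * k) 0) (List.range ((l.length + 1) / 2)))) =
      (List.map (fun k => PySem.Int.toChars (l.getD (l.length - 1 - 2 * k) 0))
        (List.range ((l.length + 1) / 2))) := by
    rw [List.map_map]
    apply List.map_congr_left
    intro k hk
    simp only [List.mem_range] at hk
    simp only [Function.comp]
    rw [rev_getD l _ (by omega)]
    have he : l.length - 1 - (0 + 2 * k) = l.length - 1 - 2 * k := by omega
    rw [he]
  have h2 : (List.map PySem.Int.toChars
      (List.map (fun k => l.reverse.getD (1 + 2 * k) 0) (List.range (l.length / 2)))) =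
      (List.map (fun k => PySem.Int.toChars (l.getD (l.length - 2 - 2 * k) 0))
        (List.range (l.length / 2))) := by
    rw [List.map_map]
    apply List.map_congr_left
    intro k hk
    simp only [List.mem_range] at hk
    simp only [Function.comp]
    rw [rev_getD l _ (by omega)]
    have he : l.length - 1 - (1 + 2 * k) = l.length - 2 - 2 * k := by omega
    rw [he]
  rw [h1, h2]

theorem a_eq (l : List Int) :
    get_highest_sum l = ((PySem.Int.ofChars? (cf l)).getD 0, (PySem.Int.ofChars? (cs l)).getD 0) := by
  unfold get_highest_sum get_digits
  have hmod : PySem.Int.mod (l.length : Int) 2 = (l.length : Int) % 2 :=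
    PySem.Int.mod_eq_emod_of_pos (by norm_num)
  have hdiv : PySem.Int.floordiv (l.length : Int) 2 = (l.length : Int) / 2 :=
    PySem.Int.floordiv_eq_ediv_of_pos (by norm_num)
  by_cases hpar : l.length % 2 = 0
  · have hm0 : ((l.length : Int)) % 2 = 0 := by omega
    simp only [hmod, hdiv, hm0, ne_eq, not_true_eq_false, if_false, ite_not]
    rw [PySem.List.foldl_prod_mk
      (fun x i => x ++ PySem.Int.toChars (PySem.List.pyGetD l ((l.length : Int) - 1 - i * 2) 0))
      (fun x i => x ++ PySem.Int.toChars (PySem.List.pyGetD l ((l.length : Int) - 2 - i * 2) 0))]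
    have e1 : List.foldl
        (fun acc i => acc ++ PySem.Int.toChars (PySem.List.pyGetD l ((l.length : Int) - 1 - i * 2) 0))
        [] (PySem.List.pyRange 0 ((l.length : Int) / 2)) = cf l := by
      rw [PySem.List.foldl_append_eq_flatMap, List.nil_append, PySem.List.pyRange_one,
        List.flatMap_map, List.flatMap_def, cf]
      rw [show (((l.length : Int) / 2) - 0).toNat = (l.length + 1) / 2 by omega]
      congr 1
      apply List.map_congr_left
      intro k hk
      simp only [List.mem_range] at hk
      rw [pyGetD_toGetD l _ (by omega) (by omega)]
      rw [show ((l.length : Int) - 1 - (0 + (k:Int)) * 2).toNat = l.length - 1 - 2 * k by omega]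
    have e2 : List.foldl
        (fun acc i => acc ++ PySem.Int.toChars (PySem.List.pyGetD l ((l.length : Int) - 2 - i * 2) 0))
        [] (PySem.List.pyRange 0 ((l.length : Int) / 2)) = cs l := by
      rw [PySem.List.foldl_append_eq_flatMap, List.nil_append, PySem.List.pyRange_one,
        List.flatMap_map, List.flatMap_def, cs]
      rw [show (((l.length : Int) / 2) - 0).toNat = l.length / 2 by omega]
      congr 1
      apply List.map_congr_left
      intro k hk
      simp only [List.mem_range] at hk
      rw [pyGetD_toGetD l _ (by omega) (by omega)]
      rw [show ((l.length : Int) - 2 - (0 + (k:Int)) * 2).toNat = l.length - 2 - 2 * k by omega]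
    rw [e1, e2]
  · have hm1 : (((l.length : Int)) % 2 ≠ 0) = True := eq_true (by omega)
    have hne : (((l.length : Int) / 2 + 1 ≠ (l.length : Int) / 2)) = True := eq_true (by omega)
    simp only [hmod, hdiv, hm1, if_true, hne]
    rw [PySem.List.foldl_prod_mk
      (fun x i => x ++ PySem.Int.toChars (PySem.List.pyGetD l ((l.length : Int) - 1 - i * 2) 0))
      (fun x i => if i ≠ (l.length : Int) / 2 + 1 - 1 then
          x ++ PySem.Int.toChars (PySem.List.pyGetD l ((l.length : Int) - 2 - i * 2) 0)
        else x)]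
    have e1 : List.foldl
        (fun acc i => acc ++ PySem.Int.toChars (PySem.List.pyGetD l ((l.length : Int) - 1 - i * 2) 0))
        [] (PySem.List.pyRange 0 ((l.length : Int) / 2 + 1)) = cf l := by
      rw [PySem.List.foldl_append_eq_flatMap, List.nil_append, PySem.List.pyRange_one,
        List.flatMap_map, List.flatMap_def, cf]
      rw [show (((l.length : Int) / 2 + 1) - 0).toNat = (l.length + 1) / 2 by omega]
      congr 1
      apply List.map_congr_left
      intro k hk
      simp only [List.mem_range] at hk
      rw [pyGetD_toGetD l _ (by omega) (by omega)]
      rw [show ((l.length : Int) - 1 - (0 + (k:Int)) * 2).toNat = l.length - 1 - 2 * k by omega]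
    have e2 : List.foldl
        (fun acc i => if i ≠ (l.length : Int) / 2 + 1 - 1 then
            acc ++ PySem.Int.toChars (PySem.List.pyGetD l ((l.length : Int) - 2 - i * 2) 0)
          else acc)
        [] (PySem.List.pyRange 0 ((l.length : Int) / 2 + 1)) = cs l := by
      rw [PySem.List.pyRange_one_succ_right (by omega : (0:Int) ≤ (l.length : Int) / 2),
        List.foldl_append]
      simp only [List.foldl_cons, List.foldl_nil]
      rw [if_neg (by omega)]
      rw [PySem.List.foldl_congr_mem _ _
        (fun acc i => acc ++ PySem.Int.toChars (PySem.List.pyGetD l ((l.length : Int) - 2 - i * 2) 0)) _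
        (by
          intro acc x hx
          rw [PySem.List.mem_pyRange_one] at hx
          rw [if_pos (by omega)])]
      rw [PySem.List.foldl_append_eq_flatMap, List.nil_append, PySem.List.pyRange_one,
        List.flatMap_map, List.flatMap_def, cs]
      rw [show (((l.length : Int) / 2) - 0).toNat = l.length / 2 by omega]
      congr 1
      apply List.map_congr_left
      intro k hk
      simp only [List.mem_range] at hk
      rw [pyGetD_toGetD l _ (by omega) (by omega)]
      rw [show ((l.length : Int) - 2 - (0 + (k:Int)) * 2).toNat = l.length - 2 - 2 * k by omega]
    rw [e1, e2]

theorem ports_eq (l : List Int) : get_highest_sum l = get_highest_sum_alt l := by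
  rw [a_eq, alt_eq]

-- ===== VERDICT (by name: the statement is the Claim_ definition above) =====
theorem get_highest_sum_spec : Claim_equal_get_highest_sum := by
  unfold Claim_equal_get_highest_sum Spec_get_highest_sum
  intro l _ _
  exact ports_eq l
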